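-- pv_equiv track=rewrite | github.com/kasi-x/animator_eval | src/etl/normalize/column_rules.py | _case_richness_score
-- ===== SOURCE A (Python) =====
-- def _case_richness_score(s: str) -> int:
--     """Return a numeric score reflecting 'information richness' of case pattern.
--
--     Higher score = more informative:
--         mixed-case = 2  (both upper and lower present)
--         all-lower  = 1
--         all-upper  = 0
--     """
--     has_upper = any(ch.isupper() for ch in s)
--     has_lower = any(ch.islower() for ch in s)
--     if has_upper and has_lower:
--         return 2
--     if has_lower:
--         return 1
--     return 0
-- ===== SOURCE B (Python) =====
-- def _case_richness_score(s: str) -> int: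
--     """Classify each cased character by its case class, collect the distinct
--     classes into a set, and compute the score arithmetically:
--     score = [lower present] * (1 + [upper present])."""
--     classes = {ch.islower() for ch in s if ch.islower() or ch.isupper()}
--     return (True in classes) * (1 + (False in classes))
-- ===== Notes on version B (the rewrite author's own statement) =====
-- stated objective: alternative
-- what changed: Instead of two any() scans and a branch chain, B collects the distinct case classes of the cased characters into a set and computes the score arithmetically as (lower present) * (1 + upper present).
import Mathlib
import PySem

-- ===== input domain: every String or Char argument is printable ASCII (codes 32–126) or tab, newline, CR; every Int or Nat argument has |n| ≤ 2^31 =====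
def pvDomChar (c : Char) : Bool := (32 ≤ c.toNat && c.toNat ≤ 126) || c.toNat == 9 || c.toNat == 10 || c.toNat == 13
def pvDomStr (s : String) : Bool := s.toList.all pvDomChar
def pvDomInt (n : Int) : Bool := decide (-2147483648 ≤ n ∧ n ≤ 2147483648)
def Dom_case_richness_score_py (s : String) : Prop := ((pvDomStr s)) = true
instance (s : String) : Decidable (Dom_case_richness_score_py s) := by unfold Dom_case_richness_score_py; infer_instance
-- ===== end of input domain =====

-- B replaces A's two any() scans + branch chain by a set of case classes of the cased
-- characters and an arithmetic formula (objective: alternative decomposition, same cost).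

-- ===== PORT A =====
def case_richness_score_py (s : String) : Int :=
  let has_upper := s.toList.any PySem.Chars.isupper
  let has_lower := s.toList.any PySem.Chars.islower
  if has_upper && has_lower then 2
  else if has_lower then 1
  else 0

-- ===== PORT B =====
-- classes = {ch.islower() for ch in s if ch.islower() or ch.isupper()}
-- return (True in classes) * (1 + (False in classes))   (bools multiplied as 0/1 ints)
def case_richness_score_py_alt (s : String) : Int :=
  let classes : PySem.Set Bool :=
    PySem.Set.ofList
      ((s.toList.filter (fun ch => PySem.Chars.islower ch || PySem.Chars.isupper ch)).map
        PySem.Chars.islower)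
  (if PySem.Set.contains classes true then (1 : Int) else 0) *
    (1 + (if PySem.Set.contains classes false then (1 : Int) else 0))

-- ===== PRECONDITION & SPEC =====
def Spec_case_richness_score_py (s : String) (out : Int) : Prop := out = case_richness_score_py_alt s
instance (s : String) (out : Int) : Decidable (Spec_case_richness_score_py s out) := by unfold Spec_case_richness_score_py; infer_instance

-- ===== CLAIM (what is proved, stated in full; the proofs are below) =====
def Claim_equal_case_richness_score_py : Prop := ∀ (s : String), Dom_case_richness_score_py s → Spec_case_richness_score_py s (case_richness_score_py s)

-- ===== LEMMAS AND PROOFS =====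
theorem lower_not_upper (c : Char) :
    PySem.Chars.islower c = true → PySem.Chars.isupper c = false := by
  unfold PySem.Chars.islower PySem.Chars.isupper
  intro h
  simp only [Bool.and_eq_true, decide_eq_true_eq, Char.le_def] at h
  simp only [Bool.and_eq_false_iff, decide_eq_false_iff_not, Char.le_def]
  simp only [UInt32.le_iff_toNat_le] at h ⊢
  have : ('a').val.toNat = 97 := rfl
  have : ('z').val.toNat = 122 := rfl
  have : ('A').val.toNat = 65 := rfl
  have : ('Z').val.toNat = 90 := rfl
  omega

theorem mem_classes_true (l : List Char) :
    (true ∈ (l.filter (fun ch => PySem.Chars.islower ch || PySem.Chars.isupper ch)).map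
        PySem.Chars.islower) ↔ l.any PySem.Chars.islower = true := by
  simp [List.mem_map, List.mem_filter, List.any_eq_true]
  constructor
  · rintro ⟨c, ⟨hc, _⟩, h⟩; exact ⟨c, hc, h⟩
  · rintro ⟨c, hc, h⟩; exact ⟨c, ⟨hc, Or.inl h⟩, h⟩

theorem mem_classes_false (l : List Char) :
    (false ∈ (l.filter (fun ch => PySem.Chars.islower ch || PySem.Chars.isupper ch)).map
        PySem.Chars.islower) ↔ l.any PySem.Chars.isupper = true := by
  simp [List.mem_map, List.mem_filter, List.any_eq_true]
  constructor
  · rintro ⟨c, ⟨_, hor⟩, h⟩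
    rcases hor with hl | hu
    · rw [h] at hl; cases hl
    · exact ⟨c, ‹c ∈ l›, hu⟩
  · rintro ⟨c, hc, hu⟩
    refine ⟨c, ⟨hc, Or.inr hu⟩, ?_⟩
    cases h : PySem.Chars.islower c
    · rfl
    · rw [lower_not_upper c h] at hu; cases hu

-- ===== VERDICT (by name: the statement is the Claim_ definition above) =====
theorem case_richness_score_py_spec : Claim_equal_case_richness_score_py := by
  intro s _
  unfold Spec_case_richness_score_py case_richness_score_py case_richness_score_py_alt
  have ht := mem_classes_true s.toList
  have hf := mem_classes_false s.toList
  cases hu : s.toList.any PySem.Chars.isupper <;>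
    cases hl : s.toList.any PySem.Chars.islower <;>
      simp_all [PySem.Set.mem_ofList]
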